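-- pv_equiv track=rewrite | github.com/Sefaria/Sefaria-Data | sources/Steinsaltz json/torah.py | getBookByPerek
-- ===== SOURCE A (Python) =====
-- perakim_count = [50, 90, 117, 153, 187]
--
-- def getBookByPerek(perek):
--     perek = int(perek)
--     # perakim_count = [Ref(x).as_ranged_segment_ref().toSections[0] for x in torah_books]
--     # curr = 0
--     # for i, p in enumerate(perakim_count):
--     #     curr += p
--     #     if i > 0:
--     #         perakim_count[i] = curr
--     for i, x in enumerate(perakim_count):
--         if perek <= x:
--             if i == 0:
--                 return (0, perek)
--             else:
--                 return (i, perek-perakim_count[i-1])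
-- ===== SOURCE B (Python) =====
-- import bisect
--
-- perakim_count = [50, 90, 117, 153, 187]
--
-- def getBookByPerek(perek):
--     perek = int(perek)
--     i = bisect.bisect_left(perakim_count, perek)
--     if i == len(perakim_count):
--         return None
--     if i == 0:
--         return (0, perek)
--     return (i, perek - perakim_count[i - 1])
-- ===== Notes on version B (the rewrite author's own statement) =====
-- stated objective: idiomatic
-- what changed: Replaces the explicit forward scan over the cumulative boundary list with a single bisect_left binary search followed by one subtraction.
import Mathlib
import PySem

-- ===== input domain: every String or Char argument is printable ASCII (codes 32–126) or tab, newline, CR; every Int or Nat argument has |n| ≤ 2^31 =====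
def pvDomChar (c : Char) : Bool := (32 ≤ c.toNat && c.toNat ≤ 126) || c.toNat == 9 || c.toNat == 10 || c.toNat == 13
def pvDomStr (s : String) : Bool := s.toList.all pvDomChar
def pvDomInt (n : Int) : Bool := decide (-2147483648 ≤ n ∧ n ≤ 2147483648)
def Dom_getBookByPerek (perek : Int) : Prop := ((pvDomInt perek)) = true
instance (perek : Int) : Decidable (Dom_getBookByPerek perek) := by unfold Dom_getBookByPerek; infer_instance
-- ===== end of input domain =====

-- B replaces A's forward scan over the boundary list with a bisect_left binary search (idiomatic).

-- ===== PORT A =====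
def perakimCount : List Int := [50, 90, 117, 153, 187]

-- the 'for i, x in enumerate(perakim_count)' loop with early return; falls through to None
def getBookByPerekLoop (perek : Int) : List (Int × Int) → Option (Int × Int)
  | [] => none
  | (i, x) :: rest =>
    if perek ≤ x then
      if i = 0 then some (0, perek)
      else some (i, perek - ((PySem.List.pyGet? perakimCount (i - 1)).getD 0))
        -- perakim_count[i-1]: always in range here (1 ≤ i < length), so getD 0 is exact
    else getBookByPerekLoop perek rest

def getBookByPerek (perek : Int) : Option (Int × Int) :=
  getBookByPerekLoop perek (PySem.List.enumerate perakimCount)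

-- ===== PORT B =====
-- bisect.bisect_left on a list of ints, as in CPython: halve [lo, hi) until empty
def bisectLeft (xs : List Int) (x : Int) (lo hi : Nat) : Nat :=
  if h : lo < hi then
    let mid := (lo + hi) / 2
    if xs.getD mid 0 < x then bisectLeft xs x (mid + 1) hi
    else bisectLeft xs x lo mid
  else lo
termination_by hi - lo
decreasing_by all_goals omega

def getBookByPerek_alt (perek : Int) : Option (Int × Int) :=
  let i := bisectLeft perakimCount perek 0 perakimCount.length
  if i = perakimCount.length then none
  else if i = 0 then some (0, perek)
  else some ((i : Int), perek - (perakimCount.getD (i - 1) 0))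

-- ===== PRECONDITION & SPEC =====
def Spec_getBookByPerek (perek : Int) (out : Option (Int × Int)) : Prop := out = getBookByPerek_alt perek
instance (perek : Int) (out : Option (Int × Int)) : Decidable (Spec_getBookByPerek perek out) := by unfold Spec_getBookByPerek; infer_instance

-- ===== CLAIM (what is proved, stated in full; the proofs are below) =====
def Claim_equal_getBookByPerek : Prop := ∀ (perek : Int), Dom_getBookByPerek perek → Spec_getBookByPerek perek (getBookByPerek perek)

-- ===== LEMMAS AND PROOFS =====

-- ===== VERDICT (by name: the statement is the Claim_ definition above) =====
theorem getBookByPerek_spec : Claim_equal_getBookByPerek := by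
  intro perek _
  unfold Spec_getBookByPerek getBookByPerek getBookByPerek_alt
  rcases le_or_gt perek 50 with h1 | h1
  · simp [perakimCount, PySem.List.enumerate, getBookByPerekLoop, bisectLeft,
          PySem.List.pyGet?, PySem.List.pyIdx?, (show ¬(50 < perek) from by omega), (show perek ≤ 50 from by omega), (show ¬(90 < perek) from by omega), (show perek ≤ 90 from by omega), (show ¬(117 < perek) from by omega), (show perek ≤ 117 from by omega), (show ¬(153 < perek) from by omega), (show perek ≤ 153 from by omega), (show ¬(187 < perek) from by omega), (show perek ≤ 187 from by omega)]
  · rcases le_or_gt perek 90 with h2 | h2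
    · simp [perakimCount, PySem.List.enumerate, getBookByPerekLoop, bisectLeft,
            PySem.List.pyGet?, PySem.List.pyIdx?, (show 50 < perek from by omega), (show ¬(perek ≤ 50) from by omega), (show ¬(90 < perek) from by omega), (show perek ≤ 90 from by omega), (show ¬(117 < perek) from by omega), (show perek ≤ 117 from by omega), (show ¬(153 < perek) from by omega), (show perek ≤ 153 from by omega), (show ¬(187 < perek) from by omega), (show perek ≤ 187 from by omega)]
    · rcases le_or_gt perek 117 with h3 | h3
      · simp [perakimCount, PySem.List.enumerate, getBookByPerekLoop, bisectLeft,
              PySem.List.pyGet?, PySem.List.pyIdx?, (show 50 < perek from by omega), (show ¬(perek ≤ 50) from by omega), (show 90 < perek from by omega), (show ¬(perek ≤ 90) from by omega), (show ¬(117 < perek) from by omega), (show perek ≤ 117 from by omega), (show ¬(153 < perek) from by omega), (show perek ≤ 153 from by omega), (show ¬(187 < perek) from by omega), (show perek ≤ 187 from by omega)]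
      · rcases le_or_gt perek 153 with h4 | h4
        · simp [perakimCount, PySem.List.enumerate, getBookByPerekLoop, bisectLeft,
                PySem.List.pyGet?, PySem.List.pyIdx?, (show 50 < perek from by omega), (show ¬(perek ≤ 50) from by omega), (show 90 < perek from by omega), (show ¬(perek ≤ 90) from by omega), (show 117 < perek from by omega), (show ¬(perek ≤ 117) from by omega), (show ¬(153 < perek) from by omega), (show perek ≤ 153 from by omega), (show ¬(187 < perek) from by omega), (show perek ≤ 187 from by omega)]
        · rcases le_or_gt perek 187 with h5 | h5
          · simp [perakimCount, PySem.List.enumerate, getBookByPerekLoop, bisectLeft,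
                  PySem.List.pyGet?, PySem.List.pyIdx?, (show 50 < perek from by omega), (show ¬(perek ≤ 50) from by omega), (show 90 < perek from by omega), (show ¬(perek ≤ 90) from by omega), (show 117 < perek from by omega), (show ¬(perek ≤ 117) from by omega), (show 153 < perek from by omega), (show ¬(perek ≤ 153) from by omega), (show ¬(187 < perek) from by omega), (show perek ≤ 187 from by omega)]
          · simp [perakimCount, PySem.List.enumerate, getBookByPerekLoop, bisectLeft,
                  PySem.List.pyGet?, PySem.List.pyIdx?, (show 50 < perek from by omega), (show ¬(perek ≤ 50) from by omega), (show 90 < perek from by omega), (show ¬(perek ≤ 90) from by omega), (show 117 < perek from by omega), (show ¬(perek ≤ 117) from by omega), (show 153 < perek from by omega), (show ¬(perek ≤ 153) from by omega), (show 187 < perek from by omega), (show ¬(perek ≤ 187) from by omega)]
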